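-- pv_equiv track=rewrite | github.com/cobeng13/TheScheduler | backend/app/time_utils.py | normalize_days_string
-- ===== SOURCE A (Python) =====
-- DAY_ALIASES = {
--     "m": "M",
--     "mon": "M",
--     "monday": "M",
--     "t": "T",
--     "tu": "T",
--     "tue": "T",
--     "tues": "T",
--     "tuesday": "T",
--     "w": "W",
--     "wed": "W",
--     "weds": "W",
--     "wednesday": "W",
--     "th": "Th",
--     "thu": "Th",
--     "thur": "Th",
--     "thurs": "Th",
--     "thursday": "Th",
--     "f": "F",
--     "fri": "F",
--     "friday": "F",
--     "sa": "Sa",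
--     "sat": "Sa",
--     "saturday": "Sa",
--     "su": "Su",
--     "sun": "Su",
--     "sunday": "Su",
-- }
--
-- CANONICAL_DAYS = {"M", "T", "W", "Th", "F", "Sa", "Su"}
--
-- def _parse_compact_days(value: str) -> list[str]:
--     tokens = []
--     idx = 0
--     while idx < len(value):
--         if value[idx : idx + 2].lower() == "th":
--             tokens.append("Th")
--             idx += 2
--         elif value[idx : idx + 2].lower() == "sa":
--             tokens.append("Sa")
--             idx += 2
--         elif value[idx : idx + 2].lower() == "su":
--             tokens.append("Su")
--             idx += 2
--         else:
--             char = value[idx].lower()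
--             tokens.append(DAY_ALIASES.get(char, value[idx]))
--             idx += 1
--     return tokens
--
-- def normalize_days_string(days: str) -> str:
--     if not days:
--         return ""
--     raw = days.replace("/", ",").replace(" ", ",")
--     parts = [part for part in raw.split(",") if part]
--     if len(parts) == 1 and len(parts[0]) > 2 and parts[0].isalpha():
--         tokens = _parse_compact_days(parts[0])
--     else:
--         tokens = []
--         for part in parts:
--             key = part.strip().lower()
--             if not key:
--                 continue
--             tokens.append(DAY_ALIASES.get(key, part.strip()))
--     normalized = [token for token in tokens if token in CANONICAL_DAYS]
--     return ",".join(normalized)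
-- ===== SOURCE B (Python) =====
-- # Different structure: one-pass character splitter (no replace/replace/split chain),
-- # a scan over per-day forms instead of the big alias dict, a lookahead-fold compact
-- # tokenizer that emits only canonical days, and no trailing canonical-set filter.
--
-- _DAY_FORMS = [
--     ("M", "mon monday"),
--     ("T", "tu tue tues tuesday"),
--     ("W", "wed weds wednesday"),
--     ("Th", "thu thur thurs thursday"),
--     ("F", "fri friday"),
--     ("Sa", "sat saturday"),
--     ("Su", "sun sunday"),
-- ]
--
--
-- def _lookup(key):
--     """Canonical day for an alias, scanning the per-day forms table."""
--     for day, forms in _DAY_FORMS: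
--         if key == day.lower() or key in forms.split():
--             return day
--     return None
--
--
-- def _segments(s):
--     """Maximal runs of non-delimiter characters, in one pass."""
--     segs, cur = [], []
--     for ch in s:
--         if ch in ",/ ":
--             if cur:
--                 segs.append("".join(cur))
--             cur = []
--         else:
--             cur.append(ch)
--     if cur:
--         segs.append("".join(cur))
--     return segs
--
--
-- def _compact(s):
--     """Tokenize a compact run like 'MWTh': a fold with a one-character lookahead."""
--     toks, pending = [], None
--     for ch in s:
--         if pending is None:
--             pending = ch
--             continue
--         pair = pending.lower() + ch.lower()
--         if pair == "th":
--             toks.append("Th")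
--             pending = None
--         elif pair == "sa":
--             toks.append("Sa")
--             pending = None
--         elif pair == "su":
--             toks.append("Su")
--             pending = None
--         else:
--             d = _lookup(pending.lower())
--             if d:
--                 toks.append(d)
--             pending = ch
--     if pending is not None:
--         d = _lookup(pending.lower())
--         if d:
--             toks.append(d)
--     return toks
--
--
-- def normalize_days_string(days: str) -> str:
--     segs = _segments(days)
--     if len(segs) == 1 and len(segs[0]) > 2 and segs[0].isalpha():
--         tokens = _compact(segs[0])
--     else:
--         tokens = [d for seg in segs if (d := _lookup(seg.strip().lower()))]
--     return ",".join(tokens)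
-- ===== Notes on version B (the rewrite author's own statement) =====
-- stated objective: alternative
-- what changed: B splits the string into segments in one character pass (no replace/replace/split chain), looks aliases up by scanning a small per-day forms table instead of the 26-entry dict, tokenizes compact runs by a fold with a one-character lookahead instead of A's index-walking while loop, and emits only canonical tokens so A's trailing canonical-set filter disappears; same asymptotic cost, different traversals and tables.
import Mathlib
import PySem

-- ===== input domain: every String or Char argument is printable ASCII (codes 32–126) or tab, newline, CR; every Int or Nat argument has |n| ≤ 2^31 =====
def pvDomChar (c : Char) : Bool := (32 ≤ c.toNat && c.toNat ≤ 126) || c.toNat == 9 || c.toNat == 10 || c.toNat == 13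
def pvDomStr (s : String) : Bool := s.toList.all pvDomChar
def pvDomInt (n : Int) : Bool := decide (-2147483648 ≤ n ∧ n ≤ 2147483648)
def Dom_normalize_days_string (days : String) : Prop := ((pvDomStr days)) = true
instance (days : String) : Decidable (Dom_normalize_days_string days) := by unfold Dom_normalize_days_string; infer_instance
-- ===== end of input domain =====

-- B replaces A's replace/replace/split pipeline by a one-pass character splitter, the big alias
-- dict by a scan over per-day forms, and the index-walking compact scanner + trailing
-- canonical-set filter by a lookahead fold that emits only canonical days (objective: alternative).

-- ===== PORT A =====
def pvDayAliases : PySem.Dict String String := PySem.Dict.mk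
  [("m","M"),("mon","M"),("monday","M"),("t","T"),("tu","T"),("tue","T"),("tues","T"),("tuesday","T"),
   ("w","W"),("wed","W"),("weds","W"),("wednesday","W"),("th","Th"),("thu","Th"),("thur","Th"),("thurs","Th"),("thursday","Th"),
   ("f","F"),("fri","F"),("friday","F"),("sa","Sa"),("sat","Sa"),("saturday","Sa"),("su","Su"),("sun","Su"),("sunday","Su")]

def pvCanonicalDays : PySem.Set String := PySem.Set.ofList ["M","T","W","Th","F","Sa","Su"]

-- A's while-loop over idx (value[idx:idx+2] is the next ≤2 chars) as recursion on the remaining chars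
def parseCompactDays : List Char → List String
  | [] => []
  | c :: rest =>
    if PySem.Chars.lower ((c :: rest).take 2) = ['t','h'] then
      "Th" :: parseCompactDays rest.tail
    else if PySem.Chars.lower ((c :: rest).take 2) = ['s','a'] then
      "Sa" :: parseCompactDays rest.tail
    else if PySem.Chars.lower ((c :: rest).take 2) = ['s','u'] then
      "Su" :: parseCompactDays rest.tail
    else
      PySem.Dict.getD pvDayAliases (String.ofList [PySem.Chars.lowerChar c]) (String.ofList [c]) ::
        parseCompactDays rest
  termination_by l => l.length
  decreasing_by all_goals (simp [List.length_tail]; try omega)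

def normalize_days_string (days : String) : String :=
  if days = "" then ""
  else
    let raw := PySem.Str.replace (PySem.Str.replace days "/" ",") " " ","
    let parts := ((PySem.Str.split? raw ",").getD []).filter (fun p => p ≠ "")
    let tokens :=
      if parts.length = 1 ∧ 2 < PySem.Str.len (parts.headD "") ∧ PySem.Str.strIsalpha (parts.headD "") then
        parseCompactDays (parts.headD "").toList
      else
        parts.foldl (fun acc part =>
          if PySem.Str.lower (PySem.Str.strip part) = "" then acc
          else acc ++ [PySem.Dict.getD pvDayAliases (PySem.Str.lower (PySem.Str.strip part))
                        (PySem.Str.strip part)]) []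
    PySem.Str.join "," (tokens.filter (fun t => PySem.Set.contains pvCanonicalDays t))

-- ===== PORT B =====
-- each canonical day together with a space-separated string of its longer spellings
def pvDayForms : List (String × String) :=
  [("M", "mon monday"),
   ("T", "tu tue tues tuesday"),
   ("W", "wed weds wednesday"),
   ("Th", "thu thur thurs thursday"),
   ("F", "fri friday"),
   ("Sa", "sat saturday"),
   ("Su", "sun sunday")]

-- B's _lookup: first day whose lowercase name or listed forms match the key
def lookupDay : List (String × String) → String → Option String
  | [], _ => none
  | (day, forms) :: rest, key =>
    if key = PySem.Str.lower day ∨ key ∈ PySem.Str.split₀ forms then some day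
    else lookupDay rest key

-- B's _segments: one pass over the characters, flushing cur at each delimiter
def segGo : List Char → List String → List Char → List String
  | [], segs, cur => if cur = [] then segs else segs ++ [String.ofList cur]
  | ch :: t, segs, cur =>
    if ch = ',' ∨ ch = '/' ∨ ch = ' ' then
      segGo t (if cur = [] then segs else segs ++ [String.ofList cur]) []
    else
      segGo t segs (cur ++ [ch])

-- B's _compact: a fold over the characters with a one-character lookahead (pending)
def compactStep : List String × Option Char → Char → List String × Option Char
  | (toks, none), ch => (toks, some ch)
  | (toks, some p), ch =>
    if String.ofList [PySem.Chars.lowerChar p, PySem.Chars.lowerChar ch] = "th" then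
      (toks ++ ["Th"], none)
    else if String.ofList [PySem.Chars.lowerChar p, PySem.Chars.lowerChar ch] = "sa" then
      (toks ++ ["Sa"], none)
    else if String.ofList [PySem.Chars.lowerChar p, PySem.Chars.lowerChar ch] = "su" then
      (toks ++ ["Su"], none)
    else
      (toks ++ (lookupDay pvDayForms (String.ofList [PySem.Chars.lowerChar p])).toList, some ch)

-- B's trailing "if pending is not None" flush
def compactFinish : List String × Option Char → List String
  | (toks, none) => toks
  | (toks, some p) => toks ++ (lookupDay pvDayForms (String.ofList [PySem.Chars.lowerChar p])).toList

def compactB (l : List Char) : List String :=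
  compactFinish (l.foldl compactStep ([], none))

def normalize_days_string_alt (days : String) : String :=
  let segs := segGo days.toList [] []
  let tokens :=
    if segs.length = 1 ∧ 2 < PySem.Str.len (segs.headD "") ∧ PySem.Str.strIsalpha (segs.headD "") then
      compactB (segs.headD "").toList
    else
      segs.filterMap (fun seg => lookupDay pvDayForms (PySem.Str.lower (PySem.Str.strip seg)))
  PySem.Str.join "," tokens

-- ===== PRECONDITION & SPEC =====
def Spec_normalize_days_string (days : String) (out : String) : Prop := out = normalize_days_string_alt days
instance (days : String) (out : String) : Decidable (Spec_normalize_days_string days out) := by unfold Spec_normalize_days_string; infer_instance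

-- ===== CLAIM (what is proved, stated in full; the proofs are below) =====
def Claim_equal_normalize_days_string : Prop := ∀ (days : String), Dom_normalize_days_string days → Spec_normalize_days_string days (normalize_days_string days)

-- ===== LEMMAS AND PROOFS =====

-- the combined effect of the two single-char replaces, as a per-char map
def pvDelimMap (c : Char) : Char := if c = '/' then ',' else if c = ' ' then ',' else c

-- proof-side model of PySem.Chars.splitOn with the single separator ','
def splitComma : List Char → List Char → List (List Char)
  | [], cur => [cur.reverse]
  | c :: rest, cur =>
    if c = ',' then cur.reverse :: splitComma rest [] else splitComma rest (c :: cur)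

theorem pv_beq_ofList (s : String) (l : List Char) : (s == String.ofList l) = (s.toList == l) := by
  by_cases h : s.toList = l
  · rw [← h, String.ofList_toList]; simp
  · have h2 : s ≠ String.ofList l := fun he => h (by rw [he, String.toList_ofList])
    simp [h, h2]

theorem pv_replace_go_single (a b : Char) :
    ∀ (fuel : Nat) (l acc : List Char), l.length ≤ fuel →
      PySem.Chars.replace.go [a] [b] fuel l acc =
        acc.reverse ++ l.map (fun c => if c = a then b else c) := by
  intro fuel
  induction fuel with
  | zero =>
      intro l acc h
      have : l = [] := List.eq_nil_of_length_eq_zero (Nat.le_zero.mp h)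
      subst this
      simp [PySem.Chars.replace.go]
  | succ n ih =>
      intro l acc h
      cases l with
      | nil => simp [PySem.Chars.replace.go]
      | cons c t =>
          rw [PySem.Chars.replace.go]
          by_cases hc : c = a
          · have hp : List.isPrefixOf [a] (c :: t) = true := by simp [List.isPrefixOf, hc]
            rw [if_pos hp, show List.drop [a].length (c :: t) = t from rfl]
            simp only [List.length_cons] at h
            rw [ih _ _ (by omega)]
            simp [hc]
          · have hp : List.isPrefixOf [a] (c :: t) = false := by simp [List.isPrefixOf]; exact fun he => absurd he.symm hc
            rw [if_neg (by simp [hp])]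
            simp only [List.length_cons] at h
            rw [ih _ _ (by omega)]
            simp [hc]

theorem pv_replace_single (a b : Char) (s : List Char) :
    PySem.Chars.replace s [a] [b] = s.map (fun c => if c = a then b else c) := by
  rw [PySem.Chars.replace, if_neg (by simp)]
  simpa using pv_replace_go_single a b s.length s [] le_rfl

theorem pv_splitOn_go_comma :
    ∀ (fuel : Nat) (l cur : List Char) (acc : List (List Char)), l.length < fuel →
      PySem.Chars.splitOn.go [','] fuel l cur acc = acc.reverse ++ splitComma l cur := by
  intro fuel
  induction fuel with
  | zero => intro l cur acc h; omega
  | succ n ih =>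
      intro l cur acc h
      cases l with
      | nil => simp [PySem.Chars.splitOn.go, splitComma]
      | cons c t =>
          rw [PySem.Chars.splitOn.go]
          by_cases hc : c = ','
          · have hp : List.isPrefixOf [','] (c :: t) = true := by simp [List.isPrefixOf, hc]
            rw [if_pos hp, show List.drop [','].length (c :: t) = t from rfl]
            simp only [List.length_cons] at h
            rw [ih _ _ _ (by omega)]
            simp [splitComma, hc]
          · have hp : List.isPrefixOf [','] (c :: t) = false := by
              simp [List.isPrefixOf]; exact fun he => absurd he.symm hc
            rw [if_neg (by simp [hp])]
            simp only [List.length_cons] at h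
            rw [ih _ _ _ (by omega)]
            simp [splitComma, hc]

theorem pv_splitOn_comma (s : List Char) :
    PySem.Chars.splitOn s [','] = splitComma s [] := by
  rw [PySem.Chars.splitOn]
  simpa using pv_splitOn_go_comma (s.length + 1) s [] [] (by omega)

-- the one-pass splitter equals "map the delimiters to ',', split on ',', drop empties"
theorem pv_segGo_eq (s : List Char) :
    ∀ (cur : List Char) (segs : List String),
      segGo s segs cur =
        segs ++ ((splitComma (s.map pvDelimMap) cur.reverse).filter (· ≠ [])).map String.ofList := by
  induction s with
  | nil =>
      intro cur segs
      by_cases hcur : cur = []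
      · simp [segGo, splitComma, hcur]
      · simp [segGo, splitComma, hcur]
  | cons ch t ih =>
      intro cur segs
      by_cases hd : ch = ',' ∨ ch = '/' ∨ ch = ' '
      · have hm : pvDelimMap ch = ',' := by
          rcases hd with rfl | rfl | rfl <;> simp [pvDelimMap]
        rw [segGo, if_pos hd]
        simp only [List.map_cons, hm]
        rw [splitComma, if_pos rfl, ih]
        by_cases hcur : cur = []
        · simp [hcur]
        · simp [hcur]
      · have hm : pvDelimMap ch = ch := by
          push_neg at hd
          simp [pvDelimMap, hd.2.1, hd.2.2]
        have hch : pvDelimMap ch ≠ ',' := by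
          rw [hm]; push_neg at hd; exact hd.1
        rw [segGo, if_neg hd]
        simp only [List.map_cons]
        rw [splitComma, if_neg (by rw [hm] at hch ⊢; exact hch), ih]
        rw [hm]
        congr 2
        simp

theorem pv_filter_ofList (L : List (List Char)) :
    L.filter ((fun p => decide (p ≠ "")) ∘ String.ofList) = L.filter (· ≠ []) := by
  apply List.filter_congr
  intro cs _
  simp [Function.comp]

-- A's parts are exactly B's segments
theorem pv_parts_eq (days : String) :
    (((PySem.Str.split? (PySem.Str.replace (PySem.Str.replace days "/" ",") " " ",") ",").getD []).filter
        (fun p => p ≠ "")) = segGo days.toList [] [] := by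
  have hrepl : (PySem.Str.replace (PySem.Str.replace days "/" ",") " " ",").toList
      = days.toList.map pvDelimMap := by
    rw [PySem.Str.toList_replace, PySem.Str.toList_replace]
    rw [show (",":String).toList = [','] from rfl, show ("/":String).toList = ['/'] from rfl,
        show (" ":String).toList = [' '] from rfl]
    rw [pv_replace_single, pv_replace_single, List.map_map]
    apply List.map_congr_left
    intro c _
    simp only [Function.comp, pvDelimMap]
    by_cases h1 : c = '/' <;> by_cases h2 : c = ' ' <;> simp [h1, h2]
  have hsplit := PySem.Str.split?_map
      (PySem.Str.replace (PySem.Str.replace days "/" ",") " " ",") ","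
  rw [hrepl, show (",":String).toList = [','] from rfl] at hsplit
  rw [PySem.Chars.split?, if_neg (by simp), pv_splitOn_comma] at hsplit
  -- extract the string-level parts from the Option.map equation
  cases hv : PySem.Str.split? (PySem.Str.replace (PySem.Str.replace days "/" ",") " " ",") "," with
  | none => rw [hv] at hsplit; simp at hsplit
  | some parts =>
      rw [hv] at hsplit
      simp only [Option.map_some, Option.some.injEq] at hsplit
      have hid : List.map (fun p => String.ofList p.toList) parts = parts := by
        simp only [String.ofList_toList, List.map_id']
      have hparts : parts = (splitComma (days.toList.map pvDelimMap) []).map String.ofList := by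
        rw [← hsplit, List.map_map]
        simp only [Function.comp_def]
        exact hid.symm
      rw [pv_segGo_eq]
      simp only [Option.getD_some, List.nil_append, hparts, List.reverse_nil]
      rw [List.filter_map, pv_filter_ofList]

-- B's forms-table scan computes exactly A's alias-dict lookup
theorem pv_lookup_eq (k : String) :
    lookupDay pvDayForms k = PySem.Dict.get? pvDayAliases k := by
  by_cases hm : k ∈ ["m","mon","monday","t","tu","tue","tues","tuesday","w","wed","weds","wednesday",
      "th","thu","thur","thurs","thursday","f","fri","friday","sa","sat","saturday","su","sun","sunday"]
  · simp only [List.mem_cons, List.not_mem_nil, or_false] at hm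
    rcases hm with rfl|rfl|rfl|rfl|rfl|rfl|rfl|rfl|rfl|rfl|rfl|rfl|rfl|rfl|rfl|rfl|rfl|rfl|rfl|rfl|rfl|rfl|rfl|rfl|rfl|rfl <;> decide
  · simp only [List.mem_cons, List.not_mem_nil, or_false, not_or] at hm
    obtain ⟨h1,h2,h3,h4,h5,h6,h7,h8,h9,h10,h11,h12,h13,h14,h15,h16,h17,h18,h19,h20,h21,h22,h23,h24,h25,h26⟩ := hm
    have hB : lookupDay pvDayForms k = none := by
      simp only [lookupDay, pvDayForms,
        show PySem.Str.lower "M" = "m" from rfl, show PySem.Str.lower "T" = "t" from rfl,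
        show PySem.Str.lower "W" = "w" from rfl, show PySem.Str.lower "Th" = "th" from rfl,
        show PySem.Str.lower "F" = "f" from rfl, show PySem.Str.lower "Sa" = "sa" from rfl,
        show PySem.Str.lower "Su" = "su" from rfl,
        show PySem.Str.split₀ "mon monday" = ["mon","monday"] from rfl,
        show PySem.Str.split₀ "tu tue tues tuesday" = ["tu","tue","tues","tuesday"] from rfl,
        show PySem.Str.split₀ "wed weds wednesday" = ["wed","weds","wednesday"] from rfl,
        show PySem.Str.split₀ "thu thur thurs thursday" = ["thu","thur","thurs","thursday"] from rfl,
        show PySem.Str.split₀ "fri friday" = ["fri","friday"] from rfl,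
        show PySem.Str.split₀ "sat saturday" = ["sat","saturday"] from rfl,
        show PySem.Str.split₀ "sun sunday" = ["sun","sunday"] from rfl]
      simp [h1,h2,h3,h4,h5,h6,h7,h8,h9,h10,h11,h12,h13,h14,h15,h16,h17,h18,h19,h20,h21,h22,h23,h24,h25,h26]
    have hA : PySem.Dict.get? pvDayAliases k = none := by
      simp only [pvDayAliases, PySem.Dict.get?_mk_cons]
      simp [PySem.Dict.get?, Ne.symm h1, Ne.symm h2, Ne.symm h3, Ne.symm h4, Ne.symm h5,
        Ne.symm h6, Ne.symm h7, Ne.symm h8, Ne.symm h9, Ne.symm h10, Ne.symm h11, Ne.symm h12,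
        Ne.symm h13, Ne.symm h14, Ne.symm h15, Ne.symm h16, Ne.symm h17, Ne.symm h18, Ne.symm h19,
        Ne.symm h20, Ne.symm h21, Ne.symm h22, Ne.symm h23, Ne.symm h24, Ne.symm h25, Ne.symm h26]
    rw [hA, hB]

theorem pv_alias_val {k v : String} (h : PySem.Dict.get? pvDayAliases k = some v) :
    v ∈ pvCanonicalDays := by
  have hm := PySem.Dict.mem_items_of_get?_eq_some _ h
  have hv : v ∈ pvDayAliases.items.map Prod.snd := List.mem_map_of_mem hm
  have hall : ∀ y ∈ pvDayAliases.items.map Prod.snd, y ∈ pvCanonicalDays := by decide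
  exact hall v hv

theorem pv_not_canon (s : String)
    (h : PySem.Dict.get? pvDayAliases (PySem.Str.lower s) = none) :
    s ∉ pvCanonicalDays := by
  intro hc
  have hs' : s ∈ ["M","T","W","Th","F","Sa","Su"] := by
    simpa [pvCanonicalDays, PySem.Set.mem_ofList] using hc
  simp only [List.mem_cons, List.not_mem_nil, or_false] at hs'
  rcases hs' with rfl | rfl | rfl | rfl | rfl | rfl | rfl <;> exact absurd h (by decide)

-- one part of the split branch: A's token, filtered, is exactly B's optional lookup hit
theorem pv_tok_one (p : String) (L : List String) :
    List.filter (fun t => decide (t ∈ pvCanonicalDays))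
      (PySem.Dict.getD pvDayAliases (PySem.Str.lower (PySem.Str.strip p)) (PySem.Str.strip p) :: L) =
    (lookupDay pvDayForms (PySem.Str.lower (PySem.Str.strip p))).toList ++
      List.filter (fun t => decide (t ∈ pvCanonicalDays)) L := by
  rw [pv_lookup_eq]
  cases hg : PySem.Dict.get? pvDayAliases (PySem.Str.lower (PySem.Str.strip p)) with
  | none =>
      rw [PySem.Dict.getD_eq_get?_getD, hg]
      have hn := pv_not_canon _ hg
      simp [hn]
  | some v =>
      rw [PySem.Dict.getD_eq_get?_getD, hg]
      have hv := pv_alias_val hg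
      simp [hv]

-- one step of the compact scan's default branch, on either side
theorem pv_char_tok (c : Char) (L : List String) :
    List.filter (fun t => decide (t ∈ pvCanonicalDays))
      (PySem.Dict.getD pvDayAliases (String.ofList [PySem.Chars.lowerChar c]) (String.ofList [c]) :: L) =
    (lookupDay pvDayForms (String.ofList [PySem.Chars.lowerChar c])).toList ++
      List.filter (fun t => decide (t ∈ pvCanonicalDays)) L := by
  by_cases hm1 : PySem.Chars.lowerChar c = 'm'
  · rw [hm1, PySem.Dict.getD_eq_get?_getD,
      show PySem.Dict.get? pvDayAliases (String.ofList ['m']) = some "M" from by decide]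
    simp [show ("M" : String) ∈ pvCanonicalDays from by decide,
      show lookupDay pvDayForms (String.ofList ['m']) = some "M" from by decide]
  by_cases hm2 : PySem.Chars.lowerChar c = 't'
  · rw [hm2, PySem.Dict.getD_eq_get?_getD,
      show PySem.Dict.get? pvDayAliases (String.ofList ['t']) = some "T" from by decide]
    simp [show ("T" : String) ∈ pvCanonicalDays from by decide,
      show lookupDay pvDayForms (String.ofList ['t']) = some "T" from by decide]
  by_cases hm3 : PySem.Chars.lowerChar c = 'w'
  · rw [hm3, PySem.Dict.getD_eq_get?_getD,
      show PySem.Dict.get? pvDayAliases (String.ofList ['w']) = some "W" from by decide]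
    simp [show ("W" : String) ∈ pvCanonicalDays from by decide,
      show lookupDay pvDayForms (String.ofList ['w']) = some "W" from by decide]
  by_cases hm4 : PySem.Chars.lowerChar c = 'f'
  · rw [hm4, PySem.Dict.getD_eq_get?_getD,
      show PySem.Dict.get? pvDayAliases (String.ofList ['f']) = some "F" from by decide]
    simp [show ("F" : String) ∈ pvCanonicalDays from by decide,
      show lookupDay pvDayForms (String.ofList ['f']) = some "F" from by decide]
  · have hA : PySem.Dict.get? pvDayAliases (String.ofList [PySem.Chars.lowerChar c]) = none := by
      simp [pvDayAliases, pv_beq_ofList, PySem.Dict.get?,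
        Ne.symm hm1, Ne.symm hm2, Ne.symm hm3, Ne.symm hm4]
    have hB : lookupDay pvDayForms (String.ofList [PySem.Chars.lowerChar c]) = none := by
      rw [pv_lookup_eq]; exact hA
    have hc' : String.ofList [c] ∉ pvCanonicalDays := by
      intro hmem
      have h0 : String.ofList [c] ∈ ["M","T","W","Th","F","Sa","Su"] := by
        simpa [pvCanonicalDays, PySem.Set.mem_ofList] using hmem
      have h1' : (String.ofList [c]).toList ∈ ["M","T","W","Th","F","Sa","Su"].map String.toList :=
        List.mem_map_of_mem h0
      rw [String.toList_ofList] at h1'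
      have hall : ∀ y ∈ ["M","T","W","Th","F","Sa","Su"].map String.toList,
          y = ['M'] ∨ y = ['T'] ∨ y = ['W'] ∨ y = ['F'] ∨ 2 ≤ y.length := by decide
      rcases hall _ h1' with h' | h' | h' | h' | h'
      · obtain rfl : c = 'M' := by simpa using h'
        exact hm1 (by decide)
      · obtain rfl : c = 'T' := by simpa using h'
        exact hm2 (by decide)
      · obtain rfl : c = 'W' := by simpa using h'
        exact hm3 (by decide)
      · obtain rfl : c = 'F' := by simpa using h'
        exact hm4 (by decide)
      · simp at h'
    rw [PySem.Dict.getD_eq_get?_getD, hA, hB]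
    simp [hc']

-- the compact scanners agree once A's tokens are filtered to canonical days
theorem pv_ofList2_th (x y : Char) (c d : Char) :
    String.ofList [x, y] = String.ofList [c, d] ↔ x = c ∧ y = d := by
  constructor
  · intro h
    have := congrArg String.toList h
    simp only [String.toList_ofList, List.cons.injEq, and_true] at this
    exact ⟨this.1, this.2⟩
  · rintro ⟨rfl, rfl⟩; rfl

theorem pv_fold_nil (p : Char) (toks : List String) :
    compactFinish (List.foldl compactStep (toks, some p) []) =
      toks ++ (parseCompactDays [p]).filter (fun t => decide (t ∈ pvCanonicalDays)) := by
  simp only [List.foldl_nil]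
  rw [parseCompactDays, if_neg (by simp [PySem.Chars.lower]),
    if_neg (by simp [PySem.Chars.lower]), if_neg (by simp [PySem.Chars.lower])]
  have h1 := pv_char_tok p ((parseCompactDays []).filter (fun t => decide (t ∈ pvCanonicalDays)))
  simp only [parseCompactDays, List.filter_nil, List.append_nil] at h1
  rw [show parseCompactDays ([] : List Char) = [] from by simp [parseCompactDays], h1, compactFinish]

theorem pv_fold_some :
    ∀ (n : Nat) (l : List Char), l.length ≤ n → ∀ (p : Char) (toks : List String),
      compactFinish (List.foldl compactStep (toks, some p) l) =
        toks ++ (parseCompactDays (p :: l)).filter (fun t => decide (t ∈ pvCanonicalDays)) := by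
  intro n
  induction n with
  | zero =>
      intro l h p toks
      have : l = [] := List.eq_nil_of_length_eq_zero (Nat.le_zero.mp h)
      subst this
      exact pv_fold_nil p toks
  | succ n ih =>
      intro l h p toks
      cases l with
      | nil => exact pv_fold_nil p toks
      | cons ch t =>
          simp only [List.length_cons] at h
          simp only [List.foldl_cons]
          by_cases hth : String.ofList [PySem.Chars.lowerChar p, PySem.Chars.lowerChar ch] = "th"
          · have hl : PySem.Chars.lower ((p :: ch :: t).take 2) = ['t','h'] := by
              have := (pv_ofList2_th _ _ 't' 'h').mp hth
              simp [PySem.Chars.lower, this.1, this.2]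
            rw [show compactStep (toks, some p) ch = (toks ++ ["Th"], none) from by
              simp [compactStep, hth]]
            rw [parseCompactDays, if_pos hl]
            simp only [List.tail_cons]
            rw [List.filter_cons_of_pos (by decide)]
            cases t with
            | nil => simp [compactFinish, parseCompactDays]
            | cons c' t' =>
                simp only [List.foldl_cons, show compactStep (toks ++ ["Th"], none) c' = (toks ++ ["Th"], some c') from rfl]
                rw [ih t' (by simp only [List.length_cons] at h; omega) c' (toks ++ ["Th"])]
                simp
          · by_cases hsa : String.ofList [PySem.Chars.lowerChar p, PySem.Chars.lowerChar ch] = "sa"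
            · have hl : PySem.Chars.lower ((p :: ch :: t).take 2) = ['s','a'] := by
                have := (pv_ofList2_th _ _ 's' 'a').mp hsa
                simp [PySem.Chars.lower, this.1, this.2]
              have hnl : ¬ PySem.Chars.lower ((p :: ch :: t).take 2) = ['t','h'] := by
                rw [hl]; decide
              rw [show compactStep (toks, some p) ch = (toks ++ ["Sa"], none) from by
                simp [compactStep, hth, hsa]]
              rw [parseCompactDays, if_neg hnl, if_pos hl]
              simp only [List.tail_cons]
              rw [List.filter_cons_of_pos (by decide)]
              cases t with
              | nil => simp [compactFinish, parseCompactDays]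
              | cons c' t' =>
                  simp only [List.foldl_cons, show ∀ tk, compactStep (tk, none) c' = (tk, some c') from fun _ => rfl]
                  rw [ih t' (by simp only [List.length_cons] at h; omega) c' (toks ++ ["Sa"])]
                  simp
            · by_cases hsu : String.ofList [PySem.Chars.lowerChar p, PySem.Chars.lowerChar ch] = "su"
              · have hl : PySem.Chars.lower ((p :: ch :: t).take 2) = ['s','u'] := by
                  have := (pv_ofList2_th _ _ 's' 'u').mp hsu
                  simp [PySem.Chars.lower, this.1, this.2]
                have hnl1 : ¬ PySem.Chars.lower ((p :: ch :: t).take 2) = ['t','h'] := by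
                  rw [hl]; decide
                have hnl2 : ¬ PySem.Chars.lower ((p :: ch :: t).take 2) = ['s','a'] := by
                  rw [hl]; decide
                rw [show compactStep (toks, some p) ch = (toks ++ ["Su"], none) from by
                  simp [compactStep, hth, hsa, hsu]]
                rw [parseCompactDays, if_neg hnl1, if_neg hnl2, if_pos hl]
                simp only [List.tail_cons]
                rw [List.filter_cons_of_pos (by decide)]
                cases t with
                | nil => simp [compactFinish, parseCompactDays]
                | cons c' t' =>
                    simp only [List.foldl_cons, show ∀ tk, compactStep (tk, none) c' = (tk, some c') from fun _ => rfl]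
                    rw [ih t' (by simp only [List.length_cons] at h; omega) c' (toks ++ ["Su"])]
                    simp
              · -- default: p emits its (possibly empty) single-char token, ch becomes pending
                have hpair : PySem.Chars.lower ((p :: ch :: t).take 2) = [PySem.Chars.lowerChar p, PySem.Chars.lowerChar ch] := by
                  simp [PySem.Chars.lower]
                have hnl1 : ¬ PySem.Chars.lower ((p :: ch :: t).take 2) = ['t','h'] := by
                  rw [hpair]; intro he
                  exact hth (by rw [(pv_ofList2_th _ _ 't' 'h')]; exact ⟨by injection he, by injection (by injection he : PySem.Chars.lowerChar ch :: ([] : List Char) = ['h'])⟩)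
                have hnl2 : ¬ PySem.Chars.lower ((p :: ch :: t).take 2) = ['s','a'] := by
                  rw [hpair]; intro he
                  exact hsa (by rw [(pv_ofList2_th _ _ 's' 'a')]; exact ⟨by injection he, by injection (by injection he : PySem.Chars.lowerChar ch :: ([] : List Char) = ['a'])⟩)
                have hnl3 : ¬ PySem.Chars.lower ((p :: ch :: t).take 2) = ['s','u'] := by
                  rw [hpair]; intro he
                  exact hsu (by rw [(pv_ofList2_th _ _ 's' 'u')]; exact ⟨by injection he, by injection (by injection he : PySem.Chars.lowerChar ch :: ([] : List Char) = ['u'])⟩)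
                rw [show compactStep (toks, some p) ch =
                    (toks ++ (lookupDay pvDayForms (String.ofList [PySem.Chars.lowerChar p])).toList, some ch) from by
                  simp [compactStep, hth, hsa, hsu]]
                rw [parseCompactDays, if_neg hnl1, if_neg hnl2, if_neg hnl3]
                rw [pv_char_tok p (parseCompactDays (ch :: t))]
                rw [ih t (by omega) ch _]
                simp

theorem pv_compact_eq (l : List Char) :
    (parseCompactDays l).filter (fun t => decide (t ∈ pvCanonicalDays)) = compactB l := by
  cases l with
  | nil => simp [parseCompactDays, compactB, compactFinish]
  | cons c t =>
      rw [compactB]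
      simp only [List.foldl_cons, show compactStep ([], none) c = ([], some c) from rfl]
      rw [pv_fold_some t.length t le_rfl c []]
      simp

-- the split branches agree once A's tokens are filtered to canonical days
theorem pv_split_fold (parts : List String) (acc : List String) :
    ((parts.foldl (fun acc part =>
        if PySem.Str.lower (PySem.Str.strip part) = "" then acc
        else acc ++ [PySem.Dict.getD pvDayAliases (PySem.Str.lower (PySem.Str.strip part))
                      (PySem.Str.strip part)]) acc).filter
      (fun t => decide (t ∈ pvCanonicalDays))) =
    acc.filter (fun t => decide (t ∈ pvCanonicalDays)) ++
      parts.filterMap (fun p => lookupDay pvDayForms (PySem.Str.lower (PySem.Str.strip p))) := by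
  induction parts generalizing acc with
  | nil => simp
  | cons p t ih =>
      simp only [List.foldl_cons, List.filterMap_cons]
      by_cases hk : PySem.Str.lower (PySem.Str.strip p) = ""
      · rw [if_pos hk, ih, hk, show lookupDay pvDayForms "" = none from by decide]
      · rw [if_neg hk, ih]
        have h1 := pv_tok_one p ([] : List String)
        simp only [List.filter_nil, List.append_nil] at h1
        cases hg : lookupDay pvDayForms (PySem.Str.lower (PySem.Str.strip p)) with
        | none =>
            rw [hg] at h1
            simp [List.filter_append, h1]
        | some v =>
            rw [hg] at h1
            simp [List.filter_append, h1]

theorem pv_filter_fun_eq :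
    (fun t => PySem.Set.contains pvCanonicalDays t) = (fun t : String => decide (t ∈ pvCanonicalDays)) := by
  funext t; simp

-- ===== VERDICT (by name: the statement is the Claim_ definition above) =====
theorem normalize_days_string_spec : Claim_equal_normalize_days_string := by
  intro days _
  unfold Spec_normalize_days_string
  by_cases hd : days = ""
  · subst hd; decide
  · simp only [normalize_days_string, normalize_days_string_alt, if_neg hd, pv_filter_fun_eq,
      pv_parts_eq]
    split_ifs with hc
    · rw [pv_compact_eq]
    · rw [pv_split_fold]
      simp
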